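-- pv_equiv track=rewrite | github.com/bfoley12/Algorithms | Hashing/Project.py | input_string
-- ===== SOURCE A (Python) =====
-- def input_string(input):
--    """Formats input keys for printing in output file
--
--    Args:
--       input (int list): list of keys from input
--
--    Returns:
--       input_string (string): input keys formatted for printing
--    """
--    input_string = "Input keys size: " + str(len(input)) + "\n"
--    input_string += "Table size: 120\n"
--    input_string += "Input keys: \n"
--    counter = 1
--    for i in input:
--       input_string += str(i) + " "
--       if counter == 5:
--          counter = 0
--          input_string += "\n"
--       counter += 1
--    input_string += "\n=====================\n"
--    return input_string
-- ===== SOURCE B (Python) =====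
-- def input_string(input):
--     """Formats input keys for printing in output file (chunked rewrite)."""
--     chunks = [input[j:j + 5] for j in range(0, len(input), 5)]
--     body = ''.join(
--         ''.join(str(i) + ' ' for i in c) + ('\n' if len(c) == 5 else '')
--         for c in chunks)
--     return ("Input keys size: " + str(len(input)) + "\n"
--             + "Table size: 120\n"
--             + "Input keys: \n"
--             + body
--             + "\n=====================\n")
-- ===== Notes on version B (the rewrite author's own statement) =====
-- stated objective: alternative
-- what changed: Replaces the single loop carrying a modular 1..5 counter and growing string with a recursive chunking of the input into groups of 5, each group rendered independently (newline only on full groups) and joined.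
import Mathlib
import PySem

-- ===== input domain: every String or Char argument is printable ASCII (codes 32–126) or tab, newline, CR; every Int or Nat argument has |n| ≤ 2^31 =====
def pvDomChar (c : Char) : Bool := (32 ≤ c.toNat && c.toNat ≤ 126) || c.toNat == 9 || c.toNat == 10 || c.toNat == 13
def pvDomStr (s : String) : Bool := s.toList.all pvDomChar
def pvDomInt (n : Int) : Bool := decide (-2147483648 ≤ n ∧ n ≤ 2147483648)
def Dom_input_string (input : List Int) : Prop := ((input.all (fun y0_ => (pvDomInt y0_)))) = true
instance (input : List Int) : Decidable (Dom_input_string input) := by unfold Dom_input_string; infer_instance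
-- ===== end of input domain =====

-- B slices the input into groups of 5 and renders each group independently; A carries a 1..5 counter in one accumulating loop.

-- ===== PORT A =====
-- loop body: input_string += str(i) + " "; if counter == 5: counter = 0; += "\n"; counter += 1
def stepA (st : List Char × Int) (i : Int) : List Char × Int :=
  let s := st.1 ++ PySem.Int.toChars i ++ [' ']
  let sc := if st.2 == 5 then (s ++ ['\n'], (0 : Int)) else (s, st.2)
  (sc.1, sc.2 + 1)

def input_string (input : List Int) : String :=
  let s0 := "Input keys size: ".toList ++ PySem.Int.toChars (input.length : Int)
              ++ "\nTable size: 120\nInput keys: \n".toList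
  let st := input.foldl stepA (s0, 1)
  String.ofList (st.1 ++ "\n=====================\n".toList)

-- ===== PORT B =====
-- ''.join(str(i) + ' ' for i in c)
def itemB (i : Int) : List Char := PySem.Int.toChars i ++ [' ']

def chunkB (c : List Int) : List Char :=
  c.flatMap itemB ++ (if c.length == 5 then ['\n'] else [])

-- chunks = [input[j:j+5] for j in range(0, len(input), 5)]
def input_string_alt (input : List Int) : String :=
  let chunks := (PySem.List.pyRange 0 (input.length : Int) 5).map
      (fun j => PySem.List.slice input (some j) (some (j + 5)))
  String.ofList ("Input keys size: ".toList ++ PySem.Int.toChars (input.length : Int)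
    ++ "\nTable size: 120\nInput keys: \n".toList
    ++ chunks.flatMap chunkB
    ++ "\n=====================\n".toList)

-- ===== PRECONDITION & SPEC =====
def Spec_input_string (input : List Int) (out : String) : Prop := out = input_string_alt input
instance (input : List Int) (out : String) : Decidable (Spec_input_string input out) := by unfold Spec_input_string; infer_instance

-- ===== CLAIM (what is proved, stated in full; the proofs are below) =====
def Claim_equal_input_string : Prop := ∀ (input : List Int), Dom_input_string input → Spec_input_string input (input_string input)

-- ===== LEMMAS AND PROOFS =====
-- proof-only recursive chunking, the common shape both sides are reduced to
def chunksR : List Int → List (List Int)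
  | [] => []
  | x :: xs => ((x :: xs).take 5) :: chunksR ((x :: xs).drop 5)
termination_by xs => xs.length
decreasing_by simp

theorem chunksR_nil : chunksR [] = [] := by rw [chunksR]

theorem chunksR_cons (x : Int) (xs : List Int) :
    chunksR (x :: xs) = ((x :: xs).take 5) :: chunksR ((x :: xs).drop 5) := by
  rw [chunksR]

-- the comprehension over range(0, len, 5) yields the same chunks as chunksR
theorem chunks_map_eq (n : Nat) : ∀ (xs : List Int), xs.length = n →
    ((PySem.List.pyRange 0 (xs.length : Int) 5).map
      (fun j => PySem.List.slice xs (some j) (some (j + 5)))) = chunksR xs := by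
  induction n using Nat.strong_induction_on with
  | _ n IH =>
    intro xs hn
    match xs with
    | [] => simp [PySem.List.pyRange, chunksR_nil]
    | x :: rest =>
      have hcons : PySem.List.pyRange 0 ((x :: rest).length : Int) 5 =
          0 :: PySem.List.pyRange 5 ((x :: rest).length : Int) 5 := by
        rw [PySem.List.pyRange_of_pos _ _ (by norm_num),
            PySem.List.pyRange_of_pos _ _ (by norm_num)]
        have h1 : (0 : Int) < ((x :: rest).length : Int) := by
          simp
        rw [if_pos h1]
        set L : Int := ((x :: rest).length : Int) with hL
        have hcnt : ((L - 0 + 5 - 1) / 5).toNat =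
            (if 5 < L then ((L - 5 + 5 - 1) / 5).toNat else 0) + 1 := by
          split_ifs with h2 <;> omega
        rw [hcnt, List.range_succ_eq_map]
        simp [List.map_map, Function.comp]
        intro a _
        ring
      rw [hcons]
      simp only [List.map_cons]
      rw [chunksR_cons]
      congr 1
      · -- first chunk: xs[0:5] = take 5
        have := PySem.List.slice_natCast_add (xs := x :: rest) (j := 0) (n := 5)
        simpa using this
      · -- remaining chunks over the dropped list
        have hdrop := IH ((x :: rest).drop 5).length (by simp at hn ⊢; omega)
          ((x :: rest).drop 5) rfl
        rw [← hdrop]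
        -- shift the range by 5 and the slices by 5
        have hshift : PySem.List.pyRange 5 ((x :: rest).length : Int) 5 =
            (PySem.List.pyRange 0 (((x :: rest).drop 5).length : Int) 5).map (fun j => j + 5) := by
          rw [PySem.List.pyRange_of_pos _ _ (by norm_num),
              PySem.List.pyRange_of_pos _ _ (by norm_num)]
          set L : Int := ((x :: rest).length : Int) with hL
          have hdlen : (((x :: rest).drop 5).length : Int) = max (L - 5) 0 := by
            simp [hL]; omega
          rw [hdlen]
          have hcnt2 : (if (5:Int) < L then ((L - 5 + 5 - 1) / 5).toNat else 0) =
              (if (0:Int) < max (L - 5) 0 then ((max (L - 5) 0 - 0 + 5 - 1) / 5).toNat else 0) := by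
            split_ifs <;> omega
          rw [hcnt2]
          rw [List.map_map]
          apply List.map_congr_left; intro k _; simp [Function.comp]; ring
        rw [hshift, List.map_map]
        apply List.map_congr_left
        intro j hj
        simp only [Function.comp]
        have hj0 : 0 ≤ j := by
          rw [PySem.List.pyRange_of_pos _ _ (by norm_num)] at hj
          simp at hj
          obtain ⟨k, _, rfl⟩ := hj; positivity
        obtain ⟨m, rfl⟩ := Int.eq_ofNat_of_zero_le hj0
        have e1 := PySem.List.slice_natCast_add (xs := x :: rest) (j := m + 5) (n := 5)
        have e2 := PySem.List.slice_natCast_add (xs := (x :: rest).drop 5) (j := m) (n := 5)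
        push_cast at e1 e2 ⊢
        rw [e1, e2, List.drop_drop, Nat.add_comm 5 m]

-- A's loop, started with counter 1, renders exactly the chunk decomposition
theorem loopA_eq_chunks (n : Nat) : ∀ (xs : List Int) (acc : List Char), xs.length = n →
    (xs.foldl stepA (acc, 1)).1 = acc ++ (chunksR xs).flatMap chunkB := by
  induction n using Nat.strong_induction_on with
  | _ n IH =>
    intro xs acc hn
    match xs with
    | [] => simp [chunksR_nil]
    | [a] => simp [stepA, chunksR_cons, chunksR_nil, chunkB, itemB]
    | [a,b] => simp [stepA, chunksR_cons, chunksR_nil, chunkB, itemB]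
    | [a,b,c] => simp [stepA, chunksR_cons, chunksR_nil, chunkB, itemB]
    | [a,b,c,d] => simp [stepA, chunksR_cons, chunksR_nil, chunkB, itemB]
    | a::b::c::d::e::rest =>
      have hr : rest.length < n := by simp at hn; omega
      have := IH rest.length hr rest
        (acc ++ itemB a ++ itemB b ++ itemB c ++ itemB d ++ itemB e ++ ['\n']) rfl
      simp only [List.foldl_cons, stepA, itemB] at this ⊢
      norm_num at this ⊢
      rw [chunksR_cons]
      simp only [List.take, List.drop, List.flatMap_cons, chunkB, itemB]
      norm_num
      simpa [List.append_assoc] using this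

-- ===== VERDICT (by name: the statement is the Claim_ definition above) =====
theorem input_string_spec : Claim_equal_input_string := by
  intro input _
  unfold Spec_input_string input_string input_string_alt
  simp only []
  rw [loopA_eq_chunks input.length input _ rfl, chunks_map_eq input.length input rfl]
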